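-- pv_equiv track=rewrite | github.com/kiminh/FAB | src/FAB_BN/RL_brain.py | para_store_iter
-- ===== SOURCE A (Python) =====
-- def para_store_iter(test_results):
--     max = 0
--     if len(test_results) >= 1:
--         for i in range(len(test_results)):
--             if i == 0:
--                 max = test_results[i][3]
--             elif i != len(test_results) - 1:
--                 if test_results[i][3] > test_results[i - 1][3] and test_results[i][3] > test_results[i + 1][3]:
--                     if max < test_results[i][3]:
--                         max = test_results[i][3]
--             else:
--                 if test_results[i][3] > max:
--                     max = test_results[i][3]
--     return max
-- ===== SOURCE B (Python) =====
-- def para_store_iter(test_results):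
--     if not test_results:
--         return 0
--     vals = [r[3] for r in test_results]
--     n = len(vals)
--     for i, v in sorted(enumerate(vals), key=lambda t: t[1], reverse=True):
--         if i == 0 or i == n - 1 or (v > vals[i - 1] and v > vals[i + 1]):
--             return v
-- ===== Notes on version B (the rewrite author's own statement) =====
-- stated objective: alternative
-- what changed: Replaces A's single left-to-right pass with a position-indexed running-max accumulator by a sort-then-scan algorithm: sort (index,value) pairs by value descending, then return the value of the first pair whose index is an endpoint or a strict local peak; no running max is maintained at all.
import Mathlib
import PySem

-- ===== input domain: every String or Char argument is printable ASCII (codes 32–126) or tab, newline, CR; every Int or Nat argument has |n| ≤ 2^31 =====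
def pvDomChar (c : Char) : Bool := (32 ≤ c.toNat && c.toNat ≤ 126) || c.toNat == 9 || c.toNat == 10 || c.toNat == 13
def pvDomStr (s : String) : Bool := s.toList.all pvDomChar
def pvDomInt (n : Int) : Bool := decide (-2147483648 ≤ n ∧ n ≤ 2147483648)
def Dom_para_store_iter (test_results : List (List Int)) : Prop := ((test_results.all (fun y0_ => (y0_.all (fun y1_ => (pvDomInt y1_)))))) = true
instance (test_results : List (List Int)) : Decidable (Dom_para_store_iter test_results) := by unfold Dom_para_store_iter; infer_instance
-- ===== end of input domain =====

-- B replaces A's single pass with a running-max accumulator by a sort-then-scan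
-- algorithm: sort (index, value) pairs by value descending and return the value of
-- the first pair whose index is an endpoint or a strict local peak.
-- Objective: alternative algorithm (A is O(n), B is O(n log n)).

-- ===== PORT A =====
-- test_results[i][3]; on Pre_ every index used by A is in range, so the defaults never fire
-- (out-of-range indexing raises IndexError in Python and is excluded by Pre_).
def pvRow3 (test_results : List (List Int)) (i : Int) : Int :=
  PySem.List.pyGetD (PySem.List.pyGetD test_results i []) 3 0

def para_store_iter (test_results : List (List Int)) : Int :=
  if 1 ≤ test_results.length then
    (PySem.List.pyRange 0 (test_results.length : Int) 1).foldl
      (fun mx i =>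
        if i = 0 then pvRow3 test_results i
        else if i ≠ (test_results.length : Int) - 1 then
          if pvRow3 test_results i > pvRow3 test_results (i - 1) ∧
             pvRow3 test_results i > pvRow3 test_results (i + 1) then
            if mx < pvRow3 test_results i then pvRow3 test_results i else mx
          else mx
        else
          if pvRow3 test_results i > mx then pvRow3 test_results i else mx)
      0
  else 0

-- ===== PORT B =====
-- the loop-body condition of Source B: index is 0, the last index, or a strict local peak
def pvP (vals : List Int) (pr : Int × Int) : Bool :=
  pr.1 == 0 || pr.1 == (vals.length : Int) - 1 ||
  (decide (pr.2 > PySem.List.pyGetD vals (pr.1 - 1) 0) &&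
   decide (pr.2 > PySem.List.pyGetD vals (pr.1 + 1) 0))

def para_store_iter_alt (test_results : List (List Int)) : Int :=
  match test_results with
  | [] => 0
  | _ :: _ =>
    let vals := test_results.map (fun r => PySem.List.pyGetD r 3 0)
    match (PySem.List.sorted (PySem.List.enumerate vals) (fun pr => pr.2) true).find?
        (pvP vals) with
    | some pr => pr.2
    | none => 0   -- unreachable: the pair with index 0 always satisfies pvP

-- ===== PRECONDITION & SPEC =====
-- A indexes row[3] of every row, raising IndexError on a row shorter than 4; exactly those inputs are excluded.
def Pre_para_store_iter (test_results : List (List Int)) : Prop :=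
  ∀ r ∈ test_results, 4 ≤ r.length
instance (test_results : List (List Int)) : Decidable (Pre_para_store_iter test_results) := by
  unfold Pre_para_store_iter; infer_instance
def pvWitness_para_store_iter : List (List Int) := [[0, 0, 0, 5], [1, 1, 1, -2], [2, 2, 2, 7]]

def Spec_para_store_iter (test_results : List (List Int)) (out : Int) : Prop := out = para_store_iter_alt test_results
instance (test_results : List (List Int)) (out : Int) : Decidable (Spec_para_store_iter test_results out) := by unfold Spec_para_store_iter; infer_instance

-- ===== CLAIM (what is proved, stated in full; the proofs are below) =====
def Claim_equal_para_store_iter : Prop := ∀ (test_results : List (List Int)), Dom_para_store_iter test_results → Pre_para_store_iter test_results → Spec_para_store_iter test_results (para_store_iter test_results)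

-- ===== LEMMAS AND PROOFS =====

-- the interior local-peak values of a value list (proof-side notion shared by both directions)
def pvPeaks (vals : List Int) : List Int :=
  (vals.zip ((vals.drop 1).zip (vals.drop 2))).filterMap
    (fun t => if t.2.1 > t.1 ∧ t.2.1 > t.2.2 then some t.2.1 else none)

-- if v > mx then v else mx  IS  max mx v
theorem pv_if_gt_eq_max (mx v : Int) : (if v > mx then v else mx) = max mx v := by
  rcases le_total v mx with h | h <;> simp [max_def] <;> omega

theorem pv_foldl_max_swap (l : List Int) (a x : Int) :
    List.foldl max (max a x) l = max (List.foldl max a l) x := by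
  induction l generalizing a with
  | nil => rfl
  | cons y t ih => simpa [max_right_comm a x y] using ih (max a y)

-- foldl max is determined by membership of the candidate list
theorem pv_foldl_max_eq_of_mem_iff (l1 l2 : List Int) (a : Int)
    (h : ∀ x, x ∈ l1 ↔ x ∈ l2) : List.foldl max a l1 = List.foldl max a l2 := by
  apply le_antisymm
  · rcases PySem.List.foldl_max_mem l1 a with h1 | h1
    · rw [h1]; exact (PySem.List.le_foldl_max l2 a).1
    · exact (PySem.List.le_foldl_max l2 a).2 _ ((h _).1 h1)
  · rcases PySem.List.foldl_max_mem l2 a with h1 | h1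
    · rw [h1]; exact (PySem.List.le_foldl_max l1 a).1
    · exact (PySem.List.le_foldl_max l1 a).2 _ ((h _).2 h1)

-- within range, A's row access is the mapped vals list
theorem pv_row3_eq_vals (test_results : List (List Int)) (i : Int) :
    pvRow3 test_results i
      = PySem.List.pyGetD (test_results.map (fun row => PySem.List.pyGetD row 3 0)) i 0 := by
  unfold pvRow3
  exact (PySem.List.pyGetD_map (fun row => PySem.List.pyGetD row 3 0) test_results i []).symm

-- vals[-1] is vals[len-1]
theorem pv_neg_one_getD (v : Int) (t : List Int) :
    PySem.List.pyGetD (v :: t) (-1) 0 = (v :: t).getD ((v :: t).length - 1) 0 := by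
  show (PySem.List.pyGet? (v :: t) (-1)).getD 0 = _
  rw [PySem.List.pyGet?_neg_one, List.getLast?_eq_getElem?, List.getD_eq_getElem?_getD]

-- membership in the peak list
theorem pv_mem_peaksB (vals : List Int) (x : Int) :
    (x ∈ pvPeaks vals)
    ↔ ∃ k : Nat, k + 2 < vals.length ∧
        (vals.getD (k+1) 0 > vals.getD k 0 ∧ vals.getD (k+1) 0 > vals.getD (k+2) 0) ∧
        x = vals.getD (k+1) 0 := by
  unfold pvPeaks
  rw [List.mem_filterMap]
  constructor
  · rintro ⟨tt, htt, hf⟩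
    rcases List.mem_iff_getElem.1 htt with ⟨k, hk, hel⟩
    have hk2 : k + 2 < vals.length := by
      simp only [List.length_zip, List.length_drop] at hk; omega
    have h1 : k < vals.length := by omega
    have hdrop1 : k < (vals.drop 1).length := by simp; omega
    have hdrop2 : k < (vals.drop 2).length := by simp; omega
    have hel' : tt = (vals[k], vals[k+1], vals[k+2]) := by
      rw [← hel]
      simp [List.getElem_zip, List.getElem_drop, Nat.add_comm]
    subst hel'
    simp only at hf
    split_ifs at hf with hcond
    · refine ⟨k, hk2, ?_, ?_⟩
      · rw [List.getD_eq_getElem _ _ (by omega : k + 1 < vals.length),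
            List.getD_eq_getElem _ _ h1,
            List.getD_eq_getElem _ _ hk2]
        exact hcond
      · rw [List.getD_eq_getElem _ _ (by omega : k + 1 < vals.length)]
        exact (Option.some.inj hf).symm
  · rintro ⟨k, hk2, hcond, hx⟩
    refine ⟨(vals[k], vals[k+1], vals[k+2]), ?_, ?_⟩
    · apply List.mem_iff_getElem.2
      refine ⟨k, ?_, ?_⟩
      · simp only [List.length_zip, List.length_drop]; omega
      · simp [List.getElem_zip, List.getElem_drop, Nat.add_comm]
    · have hcond' : vals[k+1] > vals[k] ∧ vals[k+1] > vals[k+2] := by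
        rw [List.getD_eq_getElem _ _ (by omega : k + 1 < vals.length),
            List.getD_eq_getElem _ _ (by omega : k < vals.length),
            List.getD_eq_getElem _ _ hk2] at hcond
        exact hcond
      rw [hx, List.getD_eq_getElem _ _ (by omega : k + 1 < vals.length)]
      simp only [hcond', and_self, if_pos]

-- the interior indices of A pick out exactly the peak values
theorem pv_peaks_mem_iff (vals : List Int) (x : Int) :
    (x ∈ ((PySem.List.pyRange 1 ((vals.length : Int) - 1)).filter
            (fun i => decide (PySem.List.pyGetD vals i 0 > PySem.List.pyGetD vals (i - 1) 0 ∧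
                              PySem.List.pyGetD vals i 0 > PySem.List.pyGetD vals (i + 1) 0))).map
          (fun i => PySem.List.pyGetD vals i 0))
    ↔ (x ∈ pvPeaks vals) := by
  rw [pv_mem_peaksB]
  simp only [List.mem_map, List.mem_filter, PySem.List.mem_pyRange_one, decide_eq_true_eq]
  constructor
  · rintro ⟨i, ⟨⟨h1, h2⟩, hcond⟩, hx⟩
    refine ⟨(i - 1).toNat, by omega, ?_, ?_⟩
    · have e2 : ((i - 1).toNat + 2 : Nat) = (i + 1).toNat := by omega
      rw [show ((i-1).toNat + 1 : Nat) = i.toNat from by omega, e2,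
          ← PySem.List.pyGetD_natCast vals i.toNat, ← PySem.List.pyGetD_natCast vals (i-1).toNat,
          ← PySem.List.pyGetD_natCast vals (i+1).toNat]
      rw [show (i.toNat : Int) = i from by omega, show ((i-1).toNat : Int) = i - 1 from by omega,
          show ((i+1).toNat : Int) = i + 1 from by omega]
      exact hcond
    · rw [show ((i-1).toNat + 1 : Nat) = i.toNat from by omega, ← PySem.List.pyGetD_natCast vals i.toNat,
          show (i.toNat : Int) = i from by omega]
      exact hx.symm
  · rintro ⟨k, hk2, hcond, hx⟩
    refine ⟨(k : Int) + 1, ⟨⟨by omega, by omega⟩, ?_⟩, ?_⟩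
    · rw [show ((k : Int) + 1 - 1) = (k : Int) from by ring,
          show ((k : Int) + 1 + 1) = ((k + 2 : Nat) : Int) from by push_cast; ring,
          show ((k : Int) + 1) = ((k + 1 : Nat) : Int) from by push_cast; ring,
          PySem.List.pyGetD_natCast, PySem.List.pyGetD_natCast, PySem.List.pyGetD_natCast]
      exact hcond
    · rw [show ((k : Int) + 1) = ((k + 1 : Nat) : Int) from by push_cast; ring,
          PySem.List.pyGetD_natCast]
      exact hx.symm

-- the whole loop of A, over an arbitrary nonempty value list, equals max over the candidate list
theorem pv_core (v : Int) (t : List Int) (n : Int) (hn : n = ((v :: t).length : Int)) :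
    (PySem.List.pyRange 0 n).foldl
      (fun mx i =>
        if i = 0 then PySem.List.pyGetD (v :: t) i 0
        else if i ≠ n - 1 then
          if PySem.List.pyGetD (v :: t) i 0 > PySem.List.pyGetD (v :: t) (i - 1) 0 ∧
             PySem.List.pyGetD (v :: t) i 0 > PySem.List.pyGetD (v :: t) (i + 1) 0 then
            if mx < PySem.List.pyGetD (v :: t) i 0 then PySem.List.pyGetD (v :: t) i 0 else mx
          else mx
        else if PySem.List.pyGetD (v :: t) i 0 > mx then PySem.List.pyGetD (v :: t) i 0 else mx)
      0
    = List.foldl max (PySem.List.pyGetD (v :: t) 0 0)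
        ((if 2 ≤ (v :: t).length then [PySem.List.pyGetD (v :: t) (-1) 0] else [])
          ++ pvPeaks (v :: t)) := by
  subst hn
  rcases t with _ | ⟨w, t2⟩
  · simp [PySem.List.pyRange_one_cons (by norm_num : (0:Int) < 1),
          PySem.List.pyRange_one_eq_nil (by norm_num : (1:Int) ≤ 1), pvPeaks]
  · have h2 : (2:Int) ≤ ((v :: w :: t2).length : Int) := by simp; omega
    rw [PySem.List.pyRange_one_cons (by omega : (0:Int) < ((v :: w :: t2).length : Int)), List.foldl_cons]
    simp only [zero_add, reduceIte]
    rw [PySem.List.pyRange_one_append 1 (((v :: w :: t2).length : Int)-1) ((v :: w :: t2).length : Int) (by omega) (by omega)]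
    have hseg : PySem.List.pyRange (((v :: w :: t2).length : Int)-1) ((v :: w :: t2).length : Int) = [((v :: w :: t2).length : Int)-1] := by
      have h := PySem.List.pyRange_one_singleton (((v :: w :: t2).length : Int)-1)
      rwa [sub_add_cancel] at h
    rw [hseg, List.foldl_append, List.foldl_cons, List.foldl_nil]
    simp only [if_neg (by omega : ¬(((v :: w :: t2).length : Int) - 1 = (0:Int))), ne_eq, not_true_eq_false,
      if_false, pv_if_gt_eq_max]
    rw [if_pos (by simp : 2 ≤ (v :: w :: t2).length), List.singleton_append, List.foldl_cons]
    rw [PySem.List.foldl_congr_mem (PySem.List.pyRange 1 (((v :: w :: t2).length : Int) - 1)) _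
        (fun mx i => if (PySem.List.pyGetD (v :: w :: t2) i 0 > PySem.List.pyGetD (v :: w :: t2) (i - 1) 0 ∧
            PySem.List.pyGetD (v :: w :: t2) i 0 > PySem.List.pyGetD (v :: w :: t2) (i + 1) 0)
          then max mx (PySem.List.pyGetD (v :: w :: t2) i 0) else mx) _
        (by
          intro acc i hi
          rcases PySem.List.mem_pyRange_one.1 hi with ⟨h1l, h1r⟩
          rw [if_neg (by omega : ¬ i = 0), if_pos (by omega : ¬ i = ((v :: w :: t2).length : Int) - 1)])]
    rw [PySem.List.foldl_ite_eq_foldl_filter]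
    rw [← List.foldl_map (f := fun i => PySem.List.pyGetD (v :: w :: t2) i 0) (g := max)]
    rw [pv_foldl_max_swap]
    congr 1
    · exact pv_foldl_max_eq_of_mem_iff _ _ _ (pv_peaks_mem_iff (v :: w :: t2))
    · rw [pv_neg_one_getD, PySem.List.pyGetD_of_nonneg _ _ (by omega)]
      rw [show ((((v :: w :: t2).length : Int) - 1)).toNat = (v :: w :: t2).length - 1 from by omega]

-- find? on a list sorted descending by .2 returns the maximal .2 among satisfiers
theorem pv_find_desc (p : Int × Int → Bool) (L : List (Int × Int))
    (hs : L.Pairwise (fun a b => b.2 ≤ a.2)) (m : Int × Int) (h : L.find? p = some m) :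
    ∀ x ∈ L, p x = true → x.2 ≤ m.2 := by
  induction L with
  | nil => simp at h
  | cons a t ih =>
    rcases List.pairwise_cons.1 hs with ⟨ha, ht⟩
    by_cases hpa : p a = true
    · rw [List.find?_cons_of_pos hpa] at h
      cases h
      rintro x hx _
      rcases List.mem_cons.1 hx with rfl | hx
      · exact le_refl _
      · exact ha x hx
    · rw [List.find?_cons_of_neg hpa] at h
      rintro x hx hpx
      rcases List.mem_cons.1 hx with rfl | hx
      · exact absurd hpx hpa
      · exact ih ht h x hx hpx

-- the candidate values of pv_core are exactly the values of enumerate-pairs satisfying pvP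
theorem pv_cand_iff (v : Int) (t : List Int) (x : Int) :
    (x = v ∨ x ∈ ((if 2 ≤ (v :: t).length then [PySem.List.pyGetD (v :: t) (-1) 0] else [])
          ++ pvPeaks (v :: t)))
    ↔ ∃ pr ∈ PySem.List.enumerate (v :: t), pvP (v :: t) pr = true ∧ x = pr.2 := by
  constructor
  · rintro (hxv | hx)
    · refine ⟨(0, v), ?_, ?_, hxv⟩
      · exact (PySem.List.mem_enumerate_iff _ _ _).2 ⟨0, by simp, by simp⟩
      · simp [pvP]
    · rcases List.mem_append.1 hx with hlast | hpk
      · by_cases h2 : 2 ≤ (v :: t).length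
        · rw [if_pos h2, List.mem_singleton] at hlast
          have hlt : (v :: t).length - 1 < (v :: t).length := by simp
          refine ⟨(((v :: t).length - 1 : Nat), (v :: t)[(v :: t).length - 1]), ?_, ?_, ?_⟩
          · exact (PySem.List.mem_enumerate_iff _ _ _).2 ⟨(v :: t).length - 1, hlt, by simp⟩
          · simp only [pvP, Bool.or_eq_true, beq_iff_eq]
            left; right
            omega
          · rw [hlast, pv_neg_one_getD, List.getD_eq_getElem _ _ hlt]
        · rw [if_neg h2] at hlast; simp at hlast
      · rcases (pv_mem_peaksB (v :: t) x).1 hpk with ⟨k, hk2, hcond, hx⟩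
        have hk1 : k + 1 < (v :: t).length := by omega
        refine ⟨(((k + 1 : Nat) : Int), (v :: t)[k + 1]), ?_, ?_, ?_⟩
        · exact (PySem.List.mem_enumerate_iff _ _ _).2 ⟨k + 1, hk1, by simp⟩
        · simp only [pvP, Bool.or_eq_true, Bool.and_eq_true, beq_iff_eq, decide_eq_true_eq]
          right
          rw [show ((k + 1 : Nat) : Int) - 1 = ((k : Nat) : Int) from by push_cast; ring,
              show ((k + 1 : Nat) : Int) + 1 = ((k + 2 : Nat) : Int) from by push_cast; ring,
              PySem.List.pyGetD_natCast, PySem.List.pyGetD_natCast]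
          rw [← List.getD_eq_getElem _ 0 hk1]
          exact ⟨hcond.1, hcond.2⟩
        · rw [hx, List.getD_eq_getElem _ _ hk1]
  · rintro ⟨pr, hmem, hp, rfl⟩
    rcases (PySem.List.mem_enumerate_iff _ _ _).1 hmem with ⟨k, hk, rfl⟩
    simp only [pvP, Bool.or_eq_true, Bool.and_eq_true, beq_iff_eq, decide_eq_true_eq] at hp
    simp only [zero_add] at hp
    by_cases hk0 : k = 0
    · subst hk0; left; simp
    · right
      by_cases hklast : k = (v :: t).length - 1
      · have h2 : 2 ≤ (v :: t).length := by
          simp only [List.length_cons] at hk ⊢; omega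
        apply List.mem_append.2; left
        rw [if_pos h2, List.mem_singleton, pv_neg_one_getD,
            List.getD_eq_getElem _ _ (by omega : (v :: t).length - 1 < (v :: t).length)]
        subst hklast; rfl
      · rcases hp with (h0 | hlast) | hcond
        · exact absurd (by omega : k = 0) hk0
        · exact absurd (by omega : k = (v :: t).length - 1) hklast
        · apply List.mem_append.2; right
          apply (pv_mem_peaksB (v :: t) _).2
          refine ⟨k - 1, by omega, ?_, ?_⟩
          · rw [show ((k : Nat) : Int) - 1 = ((k - 1 : Nat) : Int) from by omega,
                show ((k : Nat) : Int) + 1 = ((k - 1 + 2 : Nat) : Int) from by omega,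
                PySem.List.pyGetD_natCast, PySem.List.pyGetD_natCast] at hcond
            rw [show k - 1 + 1 = k from by omega, List.getD_eq_getElem _ 0 hk]
            exact hcond
          · rw [show k - 1 + 1 = k from by omega, List.getD_eq_getElem _ 0 hk]
  -- end

-- B's sorted-find? equals max over the candidate list of pv_core
theorem pv_B_core (v : Int) (t : List Int) :
    (match (PySem.List.sorted (PySem.List.enumerate (v :: t)) (fun pr => pr.2) true).find?
        (pvP (v :: t)) with
     | some pr => pr.2
     | none => 0)
    = List.foldl max v ((if 2 ≤ (v :: t).length then [PySem.List.pyGetD (v :: t) (-1) 0] else [])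
          ++ pvPeaks (v :: t)) := by
  have hmemL : ∀ pr, pr ∈ PySem.List.sorted (PySem.List.enumerate (v :: t)) (fun pr => pr.2) true
      ↔ pr ∈ PySem.List.enumerate (v :: t) := fun pr => PySem.List.mem_sorted _ _ _ _
  have hs : (PySem.List.sorted (PySem.List.enumerate (v :: t)) (fun pr => pr.2) true).Pairwise
      (fun a b => b.2 ≤ a.2) := PySem.List.sorted_pairwise_rev _ _
  cases hfind : (PySem.List.sorted (PySem.List.enumerate (v :: t)) (fun pr => pr.2) true).find?
      (pvP (v :: t)) with
  | none =>
    exfalso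
    have h0 : ((0 : Int), v) ∈ PySem.List.sorted (PySem.List.enumerate (v :: t)) (fun pr => pr.2) true := by
      rw [hmemL]
      exact (PySem.List.mem_enumerate_iff _ _ _).2 ⟨0, by simp, by simp⟩
    have := List.find?_eq_none.1 hfind _ h0
    simp [pvP] at this
  | some m =>
    have hm_mem : m ∈ PySem.List.enumerate (v :: t) :=
      (hmemL m).1 (List.mem_of_find?_eq_some hfind)
    have hm_p : pvP (v :: t) m = true := List.find?_some hfind
    have hred : (match some m with | some pr => pr.2 | none => (0:Int)) = m.2 := rfl
    rw [hred]
    apply le_antisymm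
    · -- m.2 ≤ foldl: m.2 is a candidate
      have hc : m.2 = v ∨ m.2 ∈ ((if 2 ≤ (v :: t).length then [PySem.List.pyGetD (v :: t) (-1) 0] else [])
            ++ pvPeaks (v :: t)) := (pv_cand_iff v t m.2).2 ⟨m, hm_mem, hm_p, rfl⟩
      rcases hc with hc | hc
      · rw [hc]; exact (PySem.List.le_foldl_max _ v).1
      · exact (PySem.List.le_foldl_max _ v).2 _ hc
    · -- foldl ≤ m.2: the fold's value is some candidate, every candidate ≤ m.2
      have hbound : ∀ x, (x = v ∨ x ∈ ((if 2 ≤ (v :: t).length then [PySem.List.pyGetD (v :: t) (-1) 0] else [])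
            ++ pvPeaks (v :: t))) → x ≤ m.2 := by
        intro x hx
        rcases (pv_cand_iff v t x).1 hx with ⟨pr, hprmem, hprp, rfl⟩
        exact pv_find_desc _ _ hs m hfind pr ((hmemL pr).2 hprmem) hprp
      rcases PySem.List.foldl_max_mem ((if 2 ≤ (v :: t).length then [PySem.List.pyGetD (v :: t) (-1) 0] else [])
            ++ pvPeaks (v :: t)) v with h | h
      · rw [h]; exact hbound v (Or.inl rfl)
      · exact hbound _ (Or.inr h)

-- ===== VERDICT =====
theorem para_store_iter_spec : Claim_equal_para_store_iter := by
  intro test_results _ hpre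
  unfold Spec_para_store_iter
  cases test_results with
  | nil => rfl
  | cons r rest =>
    show para_store_iter (r :: rest) = para_store_iter_alt (r :: rest)
    unfold para_store_iter para_store_iter_alt
    simp only [pv_row3_eq_vals, List.map_cons]
    rw [if_pos (by simp)]
    rw [pv_core (PySem.List.pyGetD r 3 0) (rest.map (fun row => PySem.List.pyGetD row 3 0)) _ (by simp)]
    rw [show PySem.List.pyGetD (PySem.List.pyGetD r 3 0 :: rest.map (fun row => PySem.List.pyGetD row 3 0)) 0 0
          = PySem.List.pyGetD r 3 0 from by
            rw [show (0:Int) = ((0:Nat):Int) from rfl, PySem.List.pyGetD_natCast]; rfl]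
    exact (pv_B_core (PySem.List.pyGetD r 3 0) (rest.map (fun row => PySem.List.pyGetD row 3 0))).symm
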